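-- pv_equiv track=rewrite | github.com/rf-iasys/OEIS | OEIS_A033638_A057979.py | A033638
-- ===== SOURCE A (Python) =====
-- def A033638(n):
--     marked = []
--     current = 1
--     k = 1
--
--     while len(marked) < n:
--         marked.append(current)
--         k += 1
--         current += k//2
--
--     return marked
-- ===== SOURCE B (Python) =====
-- def A033638(n):
--     # quarter-squares + 1, each term computed by its closed form
--     return [(k * k) // 4 + 1 for k in range(1, n + 1)]
-- ===== Notes on version B (the rewrite author's own statement) =====
-- stated objective: simpler
-- what changed: Replaces the while-loop carrying running state (current, k) with a list comprehension computing each term independently from the closed form k*k//4 + 1.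
import Mathlib
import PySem

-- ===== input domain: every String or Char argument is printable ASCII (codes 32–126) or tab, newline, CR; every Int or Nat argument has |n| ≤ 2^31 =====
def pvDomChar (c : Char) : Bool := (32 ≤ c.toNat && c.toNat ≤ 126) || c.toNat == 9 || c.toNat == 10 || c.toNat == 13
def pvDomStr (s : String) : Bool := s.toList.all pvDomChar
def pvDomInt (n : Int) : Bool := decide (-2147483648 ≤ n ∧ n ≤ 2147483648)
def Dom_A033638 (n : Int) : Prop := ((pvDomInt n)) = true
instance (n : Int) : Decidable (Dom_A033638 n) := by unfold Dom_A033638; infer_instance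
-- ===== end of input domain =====

-- B replaces A's stateful while-loop with a closed-form list comprehension (objective: simpler).

-- ===== PORT A =====
-- while len(marked) < n: marked.append(current); k += 1; current += k//2
def A033638.go (n : Int) (marked : List Int) (current k : Int) : List Int :=
  if (marked.length : Int) < n then
    A033638.go n (marked ++ [current]) (current + PySem.Int.floordiv (k + 1) 2) (k + 1)
  else
    marked
termination_by (n - marked.length).toNat
decreasing_by simp; omega

def A033638 (n : Int) : List Int := A033638.go n [] 1 1

-- ===== PORT B =====
def A033638_alt (n : Int) : List Int :=
  (PySem.List.pyRange 1 (n + 1) 1).map (fun k => PySem.Int.floordiv (k * k) 4 + 1)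

-- ===== PRECONDITION & SPEC =====
def Spec_A033638 (n : Int) (out : List Int) : Prop := out = A033638_alt n
instance (n : Int) (out : List Int) : Decidable (Spec_A033638 n out) := by unfold Spec_A033638; infer_instance

-- ===== CLAIM (what is proved, stated in full; the proofs are below) =====
def Claim_equal_A033638 : Prop := ∀ (n : Int), Dom_A033638 n → Spec_A033638 n (A033638 n)

-- ===== LEMMAS AND PROOFS =====

-- quarter-square step identity: floor(k²/4) + floor((k+1)/2) = floor((k+1)²/4)
theorem pv_quarter_step (k : Int) :
    PySem.Int.floordiv (k * k) 4 + PySem.Int.floordiv (k + 1) 2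
      = PySem.Int.floordiv ((k + 1) * (k + 1)) 4 := by
  rw [PySem.Int.floordiv_eq_ediv_of_pos (by norm_num : (0:Int) < 4),
      PySem.Int.floordiv_eq_ediv_of_pos (by norm_num : (0:Int) < 2),
      PySem.Int.floordiv_eq_ediv_of_pos (by norm_num : (0:Int) < 4)]
  rcases Int.even_or_odd k with ⟨m, hm⟩ | ⟨m, hm⟩ <;> subst hm
  · have h1 : (m + m) * (m + m) = 4 * (m * m) := by ring
    have h2 : (m + m + 1) * (m + m + 1) = 4 * (m * m + m) + 1 := by ring
    rw [h1, h2]; omega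
  · have h1 : (2 * m + 1) * (2 * m + 1) = 4 * (m * m + m) + 1 := by ring
    have h2 : (2 * m + 1 + 1) * (2 * m + 1 + 1) = 4 * (m * m + 2 * m + 1) := by ring
    rw [h1, h2]; omega

theorem pv_go_spec (n : Int) : ∀ (fuel : Nat) (k : Int) (marked : List Int),
    (n - marked.length).toNat ≤ fuel →
    (marked.length : Int) = k - 1 →
    A033638.go n marked (PySem.Int.floordiv (k * k) 4 + 1) k
      = marked ++ (PySem.List.pyRange k (n + 1) 1).map
          (fun j => PySem.Int.floordiv (j * j) 4 + 1) := by
  intro fuel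
  induction fuel with
  | zero =>
    intro k marked hfuel hk
    rw [A033638.go]
    have hnot : ¬ (marked.length : Int) < n := by omega
    rw [if_neg hnot, PySem.List.pyRange_one_eq_nil (by omega)]
    simp
  | succ f ih =>
    intro k marked hfuel hk
    rw [A033638.go]
    by_cases h : (marked.length : Int) < n
    · rw [if_pos h]
      have hstep : PySem.Int.floordiv (k * k) 4 + 1 + PySem.Int.floordiv (k + 1) 2
          = PySem.Int.floordiv ((k + 1) * (k + 1)) 4 + 1 := by
        have := pv_quarter_step k; omega
      rw [hstep]
      have hlen : (((marked ++ [PySem.Int.floordiv (k * k) 4 + 1]).length : Int)) = (k + 1) - 1 := by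
        simp; omega
      have hf : (n - ((marked ++ [PySem.Int.floordiv (k * k) 4 + 1]).length : Int)).toNat ≤ f := by
        simp; omega
      rw [ih (k + 1) (marked ++ [PySem.Int.floordiv (k * k) 4 + 1]) hf hlen,
          show PySem.List.pyRange k (n + 1) 1 = k :: PySem.List.pyRange (k + 1) (n + 1) 1 from
            PySem.List.pyRange_one_cons (by omega)]
      simp
    · rw [if_neg h, PySem.List.pyRange_one_eq_nil (by omega)]
      simp

-- ===== VERDICT (by name: the statement is the Claim_ definition above) =====
theorem A033638_spec : Claim_equal_A033638 := by
  intro n _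
  unfold Spec_A033638 A033638 A033638_alt
  have h1 : PySem.Int.floordiv ((1 : Int) * 1) 4 + 1 = 1 := by decide
  have := pv_go_spec n (n - ([] : List Int).length).toNat 1 [] (le_refl _) (by simp)
  rw [h1] at this
  rw [this]
  simp
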